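-- pv_equiv track=rewrite | github.com/wedkarz02/krypto_ug | stegano/stegano.py | extract_message_from_typo_attributes
-- ===== SOURCE A (Python) =====
-- def extract_message_from_typo_attributes(content):
--     bits = []
--     inside_p_tag = False
--
--     i = 0
--     while i < len(content):
--         if content[i:i+2] == '<p':
--             inside_p_tag = True
--             i += 2
--         elif inside_p_tag and content[i] == '>':
--             inside_p_tag = False
--             i += 1
--         elif inside_p_tag:
--             if content[i:i+18] == ' style="lineheight':
--                 bits.append('1')
--                 i += 18
--             elif content[i:i+20] == ' style="margin-botom':
--                 bits.append('0')
--                 i += 20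
--             else:
--                 i += 1
--         else:
--             i += 1
--
--     return ''.join(bits)
-- ===== SOURCE B (Python) =====
-- def extract_message_from_typo_attributes(content):
--     bits = []
--     for chunk in content.split('<p')[1:]:
--         region = chunk.split('>', 1)[0]
--         for part in region.split(' style="')[1:]:
--             if part.startswith('lineheight'):
--                 bits.append('1')
--             elif part.startswith('margin-botom'):
--                 bits.append('0')
--     return ''.join(bits)
-- ===== Notes on version B (the rewrite author's own statement) =====
-- stated objective: idiomatic
-- what changed: Replaces the flat per-character index-stepping state machine (inside_p_tag flag, manual slice comparisons at every position) with a split-based region decomposition: split the document on '<p', cut each chunk at its first '>' to get the region, then split the region on ' style="' and classify each following field by its prefix.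
import Mathlib
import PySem

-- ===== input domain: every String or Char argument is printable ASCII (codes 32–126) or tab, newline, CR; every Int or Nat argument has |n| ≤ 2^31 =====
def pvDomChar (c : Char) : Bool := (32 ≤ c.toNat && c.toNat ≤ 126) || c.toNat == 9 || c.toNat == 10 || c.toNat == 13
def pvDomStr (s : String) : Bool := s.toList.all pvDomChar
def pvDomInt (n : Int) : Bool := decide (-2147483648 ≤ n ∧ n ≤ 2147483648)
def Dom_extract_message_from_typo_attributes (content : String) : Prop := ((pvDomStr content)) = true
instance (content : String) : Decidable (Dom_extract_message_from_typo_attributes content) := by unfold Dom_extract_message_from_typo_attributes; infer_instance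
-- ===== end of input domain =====

-- B replaces A's per-character index-stepping state machine by a split-based region
-- decomposition (split on '<p', cut each chunk at its first '>', split the region on
-- ' style="'); same O(n), a more idiomatic decomposition.

-- ===== PORT A =====
-- literal transliteration of A's while-loop: position i becomes the remaining suffix,
-- the slice tests content[i:i+k] == tok become (suffix.take k = tok)
def pvALoop (cs : List Char) (inside : Bool) : List Char :=
  match cs with
  | [] => []
  | c :: rest =>
    if (c :: rest).take 2 = ['<', 'p'] then
      pvALoop ((c :: rest).drop 2) true
    else if inside && c == '>' then
      pvALoop rest false
    else if inside then
      if (c :: rest).take 18 = (" style=\"lineheight").toList then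
        '1' :: pvALoop ((c :: rest).drop 18) inside
      else if (c :: rest).take 20 = (" style=\"margin-botom").toList then
        '0' :: pvALoop ((c :: rest).drop 20) inside
      else
        pvALoop rest inside
    else
      pvALoop rest inside
termination_by cs.length
decreasing_by all_goals (simp [List.length_drop]; try omega)

def extract_message_from_typo_attributes (content : String) : String :=
  String.mk (pvALoop content.toList false)

-- ===== PORT B =====
-- transliteration of Source B: part-classification of the fields after each ' style="'
def pvBBit (part : List Char) : List Char :=
  if PySem.Chars.startswith part ("lineheight").toList then ['1']
  else if PySem.Chars.startswith part ("margin-botom").toList then ['0']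
  else []

-- region = chunk.split('>', 1)[0]; bits from region.split(' style="')[1:]
def pvBChunk (chunk : List Char) : List Char :=
  ((PySem.Chars.splitOn
      (PySem.List.pyGetD (PySem.Chars.splitOnMax chunk (">").toList 1) 0 [])
      (" style=\"").toList).drop 1).flatMap pvBBit

def extract_message_from_typo_attributes_alt (content : String) : String :=
  String.mk (((PySem.Chars.splitOn content.toList ("<p").toList).drop 1).flatMap pvBChunk)

-- ===== PRECONDITION & SPEC =====
def Spec_extract_message_from_typo_attributes (content : String) (out : String) : Prop := out = extract_message_from_typo_attributes_alt content
instance (content : String) (out : String) : Decidable (Spec_extract_message_from_typo_attributes content out) := by unfold Spec_extract_message_from_typo_attributes; infer_instance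

-- ===== CLAIM (what is proved, stated in full; the proofs are below) =====
def Claim_equal_extract_message_from_typo_attributes : Prop := ∀ (content : String), Dom_extract_message_from_typo_attributes content → Spec_extract_message_from_typo_attributes content (extract_message_from_typo_attributes content)

-- ===== LEMMAS AND PROOFS =====

-- proof-level constants (explicit char lists; definitionally equal to the ports' literals)
def pvSepP : List Char := ['<', 'p']
def pvSepS : List Char := [' ', 's', 't', 'y', 'l', 'e', '=', '"']
def pvLine : List Char := ['l', 'i', 'n', 'e', 'h', 'e', 'i', 'g', 'h', 't']
def pvMarg : List Char := ['m', 'a', 'r', 'g', 'i', 'n', '-', 'b', 'o', 't', 'o', 'm']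
def pvTokL : List Char := pvSepS ++ pvLine
def pvTokM : List Char := pvSepS ++ pvMarg

-- simple reference version of Python's str.split(sep) for a nonempty sep
def pvSplitS : List Char → List Char → List (List Char)
  | [], l => [l]
  | _ :: _, [] => [[]]
  | s0 :: st, c :: rest =>
    if (s0 :: st).isPrefixOf (c :: rest) then
      [] :: pvSplitS (s0 :: st) ((c :: rest).drop (s0 :: st).length)
    else
      (pvSplitS (s0 :: st) rest).modifyHead (c :: ·)
termination_by _ l => l.length
decreasing_by all_goals (simp [List.length_drop]; try omega)

def pvTokBits (w : List Char) : List Char := ((pvSplitS pvSepS w).drop 1).flatMap pvBBit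
def pvChunkBits (x : List Char) : List Char := pvTokBits (x.takeWhile (fun c => c != '>'))
def pvF (cs : List Char) : List Char := (pvSplitS pvSepP cs).flatMap pvChunkBits
def pvBOut (cs : List Char) : List Char := ((pvSplitS pvSepP cs).drop 1).flatMap pvChunkBits

theorem pvModifyHead_id {α : Type} (L : List α) (f : α → α) (hf : ∀ x, f x = x) :
    L.modifyHead f = L := by
  cases L <;> simp [hf]

theorem pvSplitS_nil (s0 : Char) (st : List Char) : pvSplitS (s0 :: st) [] = [[]] := by
  simp [pvSplitS.eq_def]

theorem pvSplitS_step_pos (s0 : Char) (st : List Char) (c : Char) (rest : List Char)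
    (h : (s0 :: st).isPrefixOf (c :: rest)) :
    pvSplitS (s0 :: st) (c :: rest)
      = [] :: pvSplitS (s0 :: st) ((c :: rest).drop (s0 :: st).length) := by
  rw [pvSplitS.eq_def]
  simp [h]

theorem pvSplitS_step_neg (s0 : Char) (st : List Char) (c : Char) (rest : List Char)
    (h : ¬ (s0 :: st).isPrefixOf (c :: rest)) :
    pvSplitS (s0 :: st) (c :: rest) = (pvSplitS (s0 :: st) rest).modifyHead (c :: ·) := by
  rw [pvSplitS.eq_def]
  simp [h]

theorem pvSplitS_ne_nil (s0 : Char) (st : List Char) :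
    ∀ l, pvSplitS (s0 :: st) l ≠ [] := by
  intro l
  induction hn : l.length using Nat.strong_induction_on generalizing l with
  | _ n ih =>
  cases l with
  | nil => rw [pvSplitS_nil]; exact List.cons_ne_nil _ _
  | cons c rest =>
    by_cases h : (s0 :: st).isPrefixOf (c :: rest)
    · rw [pvSplitS_step_pos _ _ _ _ h]; simp
    · rw [pvSplitS_step_neg _ _ _ _ h]
      cases hsp : pvSplitS (s0 :: st) rest with
      | nil =>
        exact absurd hsp (ih rest.length (by simp [← hn]) rest rfl)
      | cons a t => simp

theorem pvSplitS_head_prefix (s0 : Char) (st : List Char) :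
    ∀ l h t, pvSplitS (s0 :: st) l = h :: t → h <+: l := by
  intro l
  induction hn : l.length using Nat.strong_induction_on generalizing l with
  | _ n ih =>
  intro h t hs
  cases l with
  | nil =>
    rw [pvSplitS_nil] at hs
    injection hs with h1 h2
    subst h1
    exact List.nil_prefix
  | cons c rest =>
    by_cases hpre : (s0 :: st).isPrefixOf (c :: rest)
    · rw [pvSplitS_step_pos _ _ _ _ hpre] at hs
      injection hs with h1 h2
      subst h1
      exact List.nil_prefix
    · rw [pvSplitS_step_neg _ _ _ _ hpre] at hs
      cases hsp : pvSplitS (s0 :: st) rest with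
      | nil => exact absurd hsp (pvSplitS_ne_nil _ _ _)
      | cons a t2 =>
        rw [hsp, List.modifyHead_cons] at hs
        injection hs with h1 h2
        subst h1
        exact List.cons_prefix_cons.mpr ⟨rfl, ih rest.length (by simp [← hn]) rest rfl a t2 hsp⟩

theorem pvSplitS_prefix (s0 : Char) (st r : List Char) :
    pvSplitS (s0 :: st) ((s0 :: st) ++ r) = [] :: pvSplitS (s0 :: st) r := by
  rw [List.cons_append, pvSplitS_step_pos]
  · rw [show (s0 :: (st ++ r)) = (s0 :: st) ++ r by simp]
    rw [List.drop_left]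
  · rw [List.isPrefixOf_iff_prefix]
    exact ⟨r, by simp⟩

theorem pvSplitS_not_prefix (s0 : Char) (st : List Char) (c : Char) (rest : List Char)
    (h : ¬ (s0 :: st) <+: (c :: rest)) :
    pvSplitS (s0 :: st) (c :: rest) = (pvSplitS (s0 :: st) rest).modifyHead (c :: ·) :=
  pvSplitS_step_neg _ _ _ _ (fun hb => h (List.isPrefixOf_iff_prefix.mp hb))

theorem pvSplitS_append (s0 : Char) (st u v : List Char) (hu : s0 ∉ u) :
    pvSplitS (s0 :: st) (u ++ v) = (pvSplitS (s0 :: st) v).modifyHead (u ++ ·) := by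
  induction u with
  | nil => simp [pvModifyHead_id]
  | cons a u' ih =>
    have ha : a ≠ s0 := by intro h; exact hu (h ▸ List.mem_cons_self)
    have hnp : ¬ (s0 :: st) <+: (a :: (u' ++ v)) := by
      intro h
      exact ha ((List.cons_prefix_cons.mp h).1.symm)
    rw [List.cons_append, pvSplitS_not_prefix _ _ _ _ hnp, ih (fun h => hu (List.mem_cons_of_mem _ h))]
    cases pvSplitS (s0 :: st) v <;> simp

theorem pvTakeWhile_append (u v : List Char) (hu : '>' ∉ u) :
    (u ++ v).takeWhile (fun c => c != '>') = u ++ v.takeWhile (fun c => c != '>') := by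
  induction u with
  | nil => simp
  | cons a u' ih =>
    have ha : a ≠ '>' := fun h => hu (h ▸ List.mem_cons_self)
    simp [List.takeWhile_cons, ha, ih (fun h => hu (List.mem_cons_of_mem _ h))]

-- bridge: PySem.Chars.splitOn = pvSplitS for nonempty sep
theorem pvGo_eq (sep : List Char) (hsep : sep ≠ []) :
    ∀ fuel l cur acc, l.length < fuel →
      PySem.Chars.splitOn.go sep fuel l cur acc
        = acc.reverse ++ (pvSplitS sep l).modifyHead (cur.reverse ++ ·) := by
  intro fuel
  induction fuel with
  | zero => intro l cur acc h; omega
  | succ f ih =>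
    intro l cur acc h
    obtain ⟨s0, st, rfl⟩ : ∃ s0 st, sep = s0 :: st := by
      cases sep with
      | nil => exact absurd rfl hsep
      | cons a b => exact ⟨a, b, rfl⟩
    cases l with
    | nil =>
      simp [PySem.Chars.splitOn.go, pvSplitS_nil]
    | cons c rest =>
      by_cases hpre : (s0 :: st).isPrefixOf (c :: rest)
      · rw [PySem.Chars.splitOn.go]
        simp only [hpre, if_true]
        have h2 : rest.length + 1 < f + 1 := by simpa using h
        rw [ih ((c :: rest).drop (s0 :: st).length) [] (cur.reverse :: acc)
          (by rw [List.length_drop]; simp; omega)]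
        rw [pvSplitS_step_pos _ _ _ _ hpre]
        cases hsp : pvSplitS (s0 :: st) ((c :: rest).drop (s0 :: st).length) with
        | nil => exact absurd hsp (pvSplitS_ne_nil _ _ _)
        | cons a t => simp
      · rw [PySem.Chars.splitOn.go]
        simp only [hpre]
        have h2 : rest.length + 1 < f + 1 := by simpa using h
        rw [ih rest (c :: cur) acc (by omega)]
        rw [pvSplitS_step_neg _ _ _ _ hpre]
        cases pvSplitS (s0 :: st) rest <;> simp

theorem pvSplitOn_eq (l sep : List Char) (hsep : sep ≠ []) :
    PySem.Chars.splitOn l sep = pvSplitS sep l := by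
  show PySem.Chars.splitOn.go sep (l.length + 1) l [] [] = _
  rw [pvGo_eq sep hsep (l.length + 1) l [] [] (by omega)]
  simp [pvModifyHead_id]

-- bridge: chunk.split('>', 1)[0] = takeWhile (· != '>')
theorem pvGoMax_m0 (sep : List Char) (fuel : Nat) (l cur : List Char) (acc : List (List Char)) :
    PySem.Chars.splitOnMax.go sep fuel 0 l cur acc = acc.reverse ++ [cur.reverse ++ l] := by
  cases fuel with
  | zero => simp [PySem.Chars.splitOnMax.go]
  | succ f => cases l <;> simp [PySem.Chars.splitOnMax.go]

theorem pvGoMax1 :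
    ∀ fuel (l cur : List Char) (acc : List (List Char)), l.length < fuel →
      ∃ t, PySem.Chars.splitOnMax.go ['>'] fuel 1 l cur acc
        = acc.reverse ++ (cur.reverse ++ l.takeWhile (fun c => c != '>')) :: t := by
  intro fuel
  induction fuel with
  | zero => intro l cur acc h; omega
  | succ f ih =>
    intro l cur acc h
    cases l with
    | nil => exact ⟨[], by simp [PySem.Chars.splitOnMax.go]⟩
    | cons c rest =>
      by_cases hc : c = '>'
      · subst hc
        refine ⟨[rest], ?_⟩
        have hpre : ['>'].isPrefixOf ('>' :: rest) = true := by simp [List.isPrefixOf]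
        simp [PySem.Chars.splitOnMax.go, hpre, pvGoMax_m0]
      · obtain ⟨t, ht⟩ := ih rest (c :: cur) acc (by simp at h; omega)
        refine ⟨t, ?_⟩
        have hpre : ['>'].isPrefixOf (c :: rest) = false := by
          simp [List.isPrefixOf]
          exact mt Eq.symm hc
        simp [PySem.Chars.splitOnMax.go, hpre, ht, hc]
        try (first | exact hc | exact mt Eq.symm hc)

theorem pvRegion_eq (l : List Char) :
    PySem.List.pyGetD (PySem.Chars.splitOnMax l (">").toList 1) 0 []
      = l.takeWhile (fun c => c != '>') := by
  rw [show (">").toList = ['>'] by decide]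
  show PySem.List.pyGetD
      (PySem.Chars.splitOnMax.go ['>'] (l.length + 1) (1 : Int).toNat l [] []) 0 [] = _
  obtain ⟨t, ht⟩ := pvGoMax1 (l.length + 1) l [] [] (by omega)
  rw [show (1 : Int).toNat = 1 from rfl, ht]
  simp [PySem.List.pyGetD_zero_cons]

-- pvBBit on decomposed fields
theorem pvBBit_line (h : List Char) : pvBBit (pvLine ++ h) = ['1'] := by
  rw [pvBBit, if_pos]
  rw [show ("lineheight").toList = pvLine by decide]
  rw [PySem.Chars.startswith_iff]
  exact ⟨h, rfl⟩

theorem pvNot_line_prefix_marg (h : List Char) : ¬ pvLine <+: (pvMarg ++ h) := by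
  intro hp
  obtain ⟨t, ht⟩ := hp
  simp [pvLine, pvMarg] at ht

theorem pvBBit_marg (h : List Char) : pvBBit (pvMarg ++ h) = ['0'] := by
  rw [pvBBit, if_neg, if_pos]
  · rw [show ("margin-botom").toList = pvMarg by decide, PySem.Chars.startswith_iff]
    exact ⟨h, rfl⟩
  · rw [show ("lineheight").toList = pvLine by decide, PySem.Chars.startswith_iff]
    exact pvNot_line_prefix_marg h

theorem pvBBit_none (p : List Char) (hl : ¬ pvLine <+: p) (hm : ¬ pvMarg <+: p) :
    pvBBit p = [] := by
  rw [pvBBit, if_neg, if_neg]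
  · rw [show ("margin-botom").toList = pvMarg by decide, PySem.Chars.startswith_iff]; exact hm
  · rw [show ("lineheight").toList = pvLine by decide, PySem.Chars.startswith_iff]; exact hl

-- token-level recurrences for pvTokBits
theorem pvTokBits_nil : pvTokBits [] = [] := by
  rw [pvTokBits, show pvSplitS pvSepS [] = [[]] from pvSplitS_nil _ _]
  rfl

theorem pvTokBits_tokL (w : List Char) : pvTokBits (pvTokL ++ w) = '1' :: pvTokBits w := by
  have h1 : pvSplitS pvSepS (pvTokL ++ w) = [] :: pvSplitS pvSepS (pvLine ++ w) := by
    rw [show pvTokL ++ w = pvSepS ++ (pvLine ++ w) by simp [pvTokL]]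
    exact pvSplitS_prefix _ _ _
  have h2 : pvSplitS pvSepS (pvLine ++ w) = (pvSplitS pvSepS w).modifyHead (pvLine ++ ·) :=
    pvSplitS_append ' ' _ pvLine w (by decide)
  cases hsp : pvSplitS pvSepS w with
  | nil => exact absurd hsp (pvSplitS_ne_nil ' ' _ _)
  | cons a t =>
    rw [pvTokBits, pvTokBits, h1, h2, hsp, List.modifyHead_cons]
    simp [pvBBit_line]

theorem pvTokBits_tokM (w : List Char) : pvTokBits (pvTokM ++ w) = '0' :: pvTokBits w := by
  have h1 : pvSplitS pvSepS (pvTokM ++ w) = [] :: pvSplitS pvSepS (pvMarg ++ w) := by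
    rw [show pvTokM ++ w = pvSepS ++ (pvMarg ++ w) by simp [pvTokM]]
    exact pvSplitS_prefix _ _ _
  have h2 : pvSplitS pvSepS (pvMarg ++ w) = (pvSplitS pvSepS w).modifyHead (pvMarg ++ ·) :=
    pvSplitS_append ' ' _ pvMarg w (by decide)
  cases hsp : pvSplitS pvSepS w with
  | nil => exact absurd hsp (pvSplitS_ne_nil ' ' _ _)
  | cons a t =>
    rw [pvTokBits, pvTokBits, h1, h2, hsp, List.modifyHead_cons]
    simp [pvBBit_marg]

theorem pvTokBits_cons (c : Char) (w : List Char)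
    (hL : ¬ pvTokL <+: (c :: w)) (hM : ¬ pvTokM <+: (c :: w)) :
    pvTokBits (c :: w) = pvTokBits w := by
  by_cases hp : pvSepS <+: (c :: w)
  · obtain ⟨r, hr⟩ := hp
    have hw : w = ['s', 't', 'y', 'l', 'e', '=', '"'] ++ r := by
      have h0 : (' ' :: (['s', 't', 'y', 'l', 'e', '=', '"'] ++ r)) = c :: w := hr
      injection h0 with _ h2
      exact h2.symm
    cases hsp : pvSplitS pvSepS r with
    | nil => exact absurd hsp (pvSplitS_ne_nil ' ' _ _)
    | cons a t =>
      have ha : a <+: r := pvSplitS_head_prefix ' ' _ r a t hsp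
      have hl' : ¬ pvLine <+: a := by
        intro hpl
        obtain ⟨u, hu⟩ := hpl.trans ha
        refine hL ?_
        rw [← hr, show pvTokL = pvSepS ++ pvLine from rfl]
        exact ⟨u, by rw [List.append_assoc, hu]⟩
      have hm' : ¬ pvMarg <+: a := by
        intro hpm
        obtain ⟨u, hu⟩ := hpm.trans ha
        refine hM ?_
        rw [← hr, show pvTokM = pvSepS ++ pvMarg from rfl]
        exact ⟨u, by rw [List.append_assoc, hu]⟩
      rw [pvTokBits, pvTokBits, ← hr, hw]
      rw [show pvSplitS pvSepS (pvSepS ++ r) = [] :: pvSplitS pvSepS r from pvSplitS_prefix _ _ _]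
      rw [show pvSplitS pvSepS (['s', 't', 'y', 'l', 'e', '=', '"'] ++ r)
            = (pvSplitS pvSepS r).modifyHead (['s', 't', 'y', 'l', 'e', '=', '"'] ++ ·) from
          pvSplitS_append ' ' _ _ r (by decide)]
      rw [hsp, List.modifyHead_cons]
      simp [pvBBit_none a hl' hm']
  · cases hsp : pvSplitS pvSepS w with
    | nil => exact absurd hsp (pvSplitS_ne_nil ' ' _ _)
    | cons a t =>
      rw [pvTokBits, pvTokBits,
        show pvSplitS pvSepS (c :: w) = (pvSplitS pvSepS w).modifyHead (c :: ·) from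
          pvSplitS_not_prefix ' ' _ c w hp,
        hsp, List.modifyHead_cons]
      simp

-- chunk-level recurrences
theorem pvChunkBits_nil : pvChunkBits [] = [] := by
  rw [pvChunkBits]
  simp [pvTokBits_nil]

theorem pvChunkBits_gt (h : List Char) : pvChunkBits ('>' :: h) = [] := by
  rw [pvChunkBits, List.takeWhile_cons]
  simp [pvTokBits_nil]

theorem pvChunkBits_tokL (x : List Char) : pvChunkBits (pvTokL ++ x) = '1' :: pvChunkBits x := by
  rw [pvChunkBits, pvTakeWhile_append _ _ (by decide), pvTokBits_tokL]; rfl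

theorem pvChunkBits_tokM (x : List Char) : pvChunkBits (pvTokM ++ x) = '0' :: pvChunkBits x := by
  rw [pvChunkBits, pvTakeWhile_append _ _ (by decide), pvTokBits_tokM]; rfl

theorem pvChunkBits_cons (c : Char) (x : List Char) (hc : c ≠ '>')
    (hL : ¬ pvTokL <+: (c :: x)) (hM : ¬ pvTokM <+: (c :: x)) :
    pvChunkBits (c :: x) = pvChunkBits x := by
  rw [pvChunkBits, pvChunkBits, List.takeWhile_cons]
  simp only [hc, bne_iff_ne, ne_eq, not_false_iff, if_pos]
  have htp : (c :: x.takeWhile (fun c => c != '>')) <+: (c :: x) :=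
    List.cons_prefix_cons.mpr ⟨rfl, List.takeWhile_prefix _⟩
  exact pvTokBits_cons c _ (fun h => hL (h.trans htp)) (fun h => hM (h.trans htp))

-- recurrences for the whole-document functions pvF / pvBOut
theorem pvF_nil : pvF [] = [] := by
  rw [pvF, show pvSplitS pvSepP [] = [[]] from pvSplitS_nil _ _]
  simp [pvChunkBits_nil]

theorem pvBOut_nil : pvBOut [] = [] := by
  rw [pvBOut, show pvSplitS pvSepP [] = [[]] from pvSplitS_nil _ _]
  simp

theorem pvF_p (x : List Char) : pvF (pvSepP ++ x) = pvF x := by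
  rw [pvF, pvF, show pvSplitS pvSepP (pvSepP ++ x) = [] :: pvSplitS pvSepP x from pvSplitS_prefix _ _ _]
  simp [pvChunkBits_nil]

theorem pvBOut_p (x : List Char) : pvBOut (pvSepP ++ x) = pvF x := by
  rw [pvBOut, pvF, show pvSplitS pvSepP (pvSepP ++ x) = [] :: pvSplitS pvSepP x from pvSplitS_prefix _ _ _]
  simp

theorem pvNotSepP_of_ne (c : Char) (rest : List Char) (hc : c ≠ '<') :
    ¬ pvSepP <+: (c :: rest) := by
  intro hp
  exact hc ((List.cons_prefix_cons.mp hp).1.symm)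

theorem pvF_gt (rest : List Char) : pvF ('>' :: rest) = pvBOut rest := by
  have hnp : ¬ pvSepP <+: ('>' :: rest) := pvNotSepP_of_ne _ _ (by decide)
  rw [pvF, pvBOut,
    show pvSplitS pvSepP ('>' :: rest) = (pvSplitS pvSepP rest).modifyHead ('>' :: ·) from
      pvSplitS_not_prefix '<' _ '>' rest hnp]
  cases hsp : pvSplitS pvSepP rest with
  | nil => exact absurd hsp (pvSplitS_ne_nil '<' _ _)
  | cons h0 t0 => simp [List.modifyHead_cons, pvChunkBits_gt]

theorem pvF_tokL (x : List Char) : pvF (pvTokL ++ x) = '1' :: pvF x := by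
  rw [pvF, pvF,
    show pvSplitS pvSepP (pvTokL ++ x) = (pvSplitS pvSepP x).modifyHead (pvTokL ++ ·) from
      pvSplitS_append '<' _ pvTokL x (by decide)]
  cases hsp : pvSplitS pvSepP x with
  | nil => exact absurd hsp (pvSplitS_ne_nil '<' _ _)
  | cons h0 t0 => simp [List.modifyHead_cons, pvChunkBits_tokL]

theorem pvF_tokM (x : List Char) : pvF (pvTokM ++ x) = '0' :: pvF x := by
  rw [pvF, pvF,
    show pvSplitS pvSepP (pvTokM ++ x) = (pvSplitS pvSepP x).modifyHead (pvTokM ++ ·) from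
      pvSplitS_append '<' _ pvTokM x (by decide)]
  cases hsp : pvSplitS pvSepP x with
  | nil => exact absurd hsp (pvSplitS_ne_nil '<' _ _)
  | cons h0 t0 => simp [List.modifyHead_cons, pvChunkBits_tokM]

theorem pvF_cons (c : Char) (rest : List Char) (hnp : ¬ pvSepP <+: (c :: rest)) (hc : c ≠ '>')
    (hL : ¬ pvTokL <+: (c :: rest)) (hM : ¬ pvTokM <+: (c :: rest)) :
    pvF (c :: rest) = pvF rest := by
  rw [pvF, pvF,
    show pvSplitS pvSepP (c :: rest) = (pvSplitS pvSepP rest).modifyHead (c :: ·) from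
      pvSplitS_not_prefix '<' _ c rest hnp]
  cases hsp : pvSplitS pvSepP rest with
  | nil => exact absurd hsp (pvSplitS_ne_nil '<' _ _)
  | cons h0 t0 =>
    have hh : (c :: h0) <+: (c :: rest) :=
      List.cons_prefix_cons.mpr ⟨rfl, pvSplitS_head_prefix '<' _ rest h0 t0 hsp⟩
    rw [List.modifyHead_cons]
    simp [pvChunkBits_cons c h0 hc (fun h => hL (h.trans hh)) (fun h => hM (h.trans hh))]

theorem pvBOut_cons (c : Char) (rest : List Char) (hnp : ¬ pvSepP <+: (c :: rest)) :
    pvBOut (c :: rest) = pvBOut rest := by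
  rw [pvBOut, pvBOut,
    show pvSplitS pvSepP (c :: rest) = (pvSplitS pvSepP rest).modifyHead (c :: ·) from
      pvSplitS_not_prefix '<' _ c rest hnp]
  cases hsp : pvSplitS pvSepP rest with
  | nil => exact absurd hsp (pvSplitS_ne_nil '<' _ _)
  | cons h0 t0 => rw [List.modifyHead_cons]; simp

-- helpers translating A's slice tests into prefix facts
theorem pvTake_prefix {l t : List Char} {k : Nat} (hk : t.length = k) (h : l.take k = t) :
    t <+: l := by
  subst hk
  exact List.prefix_iff_eq_take.mpr h.symm

theorem pvPrefix_take {l t : List Char} {k : Nat} (hk : t.length = k) (h : t <+: l) :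
    l.take k = t := by
  subst hk
  exact (List.prefix_iff_eq_take.mp h).symm

-- main induction: A's state machine computes the split decomposition
theorem pvMain (cs : List Char) (inside : Bool) :
    pvALoop cs inside = if inside then pvF cs else pvBOut cs := by
  fun_induction pvALoop cs inside with
  | case1 inside => cases inside <;> simp [pvF_nil, pvBOut_nil]
  | case2 inside c rest htake ih =>
    have hpre : pvSepP <+: (c :: rest) := pvTake_prefix rfl htake
    obtain ⟨x, hx⟩ := hpre
    have hdrop : (c :: rest).drop 2 = x := by
      rw [← hx]; exact List.drop_left' rfl
    rw [ih, hdrop, ← hx]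
    cases inside <;> simp [pvF_p, pvBOut_p]
  | case3 inside c rest htake hgt ih =>
    have hig : inside = true ∧ c = '>' := by simpa using hgt
    obtain ⟨rfl, rfl⟩ := hig
    rw [ih]
    simp [pvF_gt]
  | case4 c rest hnt2 htokL hngt ih =>
    have htokL' : (c :: rest).take 18 = pvTokL := by rw [htokL]; decide
    have hpre : pvTokL <+: (c :: rest) := pvTake_prefix rfl htokL'
    obtain ⟨x, hx⟩ := hpre
    have hdrop : (c :: rest).drop 18 = x := by
      rw [← hx]; exact List.drop_left' rfl
    rw [ih, hdrop, ← hx]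
    simp [pvF_tokL]
  | case5 c rest hnt2 hntokL htokM hngt ih =>
    have htokM' : (c :: rest).take 20 = pvTokM := by rw [htokM]; decide
    have hpre : pvTokM <+: (c :: rest) := pvTake_prefix rfl htokM'
    obtain ⟨x, hx⟩ := hpre
    have hdrop : (c :: rest).drop 20 = x := by
      rw [← hx]; exact List.drop_left' rfl
    rw [ih, hdrop, ← hx]
    simp [pvF_tokM]
  | case6 c rest hnt2 hntokL hntokM hngt ih =>
    have hc : c ≠ '>' := by
      intro h
      exact hngt (by simp [h])
    have hnp : ¬ pvSepP <+: (c :: rest) := fun hp => hnt2 (pvPrefix_take rfl hp)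
    have hL : ¬ pvTokL <+: (c :: rest) := fun hp => hntokL (by
      rw [show (" style=\"lineheight").toList = pvTokL by decide]
      exact pvPrefix_take rfl hp)
    have hM : ¬ pvTokM <+: (c :: rest) := fun hp => hntokM (by
      rw [show (" style=\"margin-botom").toList = pvTokM by decide]
      exact pvPrefix_take rfl hp)
    rw [ih]
    simp [pvF_cons c rest hnp hc hL hM]
  | case7 inside c rest htake hgt hin ih =>
    have hif : inside = false := by
      cases inside
      · rfl
      · exact absurd rfl hin
    subst hif
    have hnp : ¬ pvSepP <+: (c :: rest) := fun hp => htake (pvPrefix_take rfl hp)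
    rw [ih]
    simp [pvBOut_cons c rest hnp]

-- bridge pvBChunk to pvChunkBits
theorem pvBChunk_eq (chunk : List Char) : pvBChunk chunk = pvChunkBits chunk := by
  rw [pvBChunk, pvRegion_eq, pvSplitOn_eq _ _ (by decide),
    show (" style=\"").toList = pvSepS by decide]
  rfl

-- ===== VERDICT (by name: the statement is the Claim_ definition above) =====
theorem extract_message_from_typo_attributes_spec : Claim_equal_extract_message_from_typo_attributes := by
  intro content _
  show extract_message_from_typo_attributes content = extract_message_from_typo_attributes_alt content
  rw [extract_message_from_typo_attributes, extract_message_from_typo_attributes_alt]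
  rw [pvSplitOn_eq _ _ (by decide), show ("<p").toList = pvSepP by decide]
  rw [show pvBChunk = pvChunkBits from funext pvBChunk_eq]
  have h1 := pvMain content.toList false
  simp only [Bool.false_eq_true, if_false] at h1
  rw [h1]
  rfl
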